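-- pv_equiv track=rewrite | github.com/RolandPetrila/Sistem-Inteligent-Analize | backend/reports/timeline_generator.py | _score_trend_label
-- ===== SOURCE A (Python) =====
-- def _score_trend_label(values: list) -> str:
--     """Eticheta pentru trendul scorului de risc."""
--     valid = [v for v in values if v is not None]
--     if len(valid) < 2:
--         return "INSUFICIENT DATE"
--     delta = valid[-1] - valid[0]
--     if delta > 5:
--         return "IN IMBUNATATIRE"
--     elif delta < -5:
--         return "IN DETERIORARE"
--     else:
--         return "STABIL"
-- ===== SOURCE B (Python) =====
-- def _first_valid(values):
--     """Return (first non-None value, remaining suffix) or None."""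
--     for k, v in enumerate(values):
--         if v is not None:
--             return v, values[k + 1:]
--     return None
--
-- def _score_trend_label(values: list) -> str:
--     """Eticheta pentru trendul scorului de risc."""
--     head = _first_valid(values)
--     if head is None:
--         return "INSUFICIENT DATE"
--     first, rest = head
--     if _first_valid(rest) is None:
--         return "INSUFICIENT DATE"
--     last, _ = _first_valid(list(reversed(values)))
--     delta = last - first
--     if delta > 5:
--         return "IN IMBUNATATIRE"
--     elif delta < -5:
--         return "IN DETERIORARE"
--     else:
--         return "STABIL"
-- ===== Notes on version B (the rewrite author's own statement) =====
-- stated objective: alternative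
-- what changed: B never builds the filtered list: it finds the first non-None value by a forward early-exit scan, decides sufficiency by whether the remaining suffix holds another non-None, and takes the last value from a scan of the reversed list.
import Mathlib
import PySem

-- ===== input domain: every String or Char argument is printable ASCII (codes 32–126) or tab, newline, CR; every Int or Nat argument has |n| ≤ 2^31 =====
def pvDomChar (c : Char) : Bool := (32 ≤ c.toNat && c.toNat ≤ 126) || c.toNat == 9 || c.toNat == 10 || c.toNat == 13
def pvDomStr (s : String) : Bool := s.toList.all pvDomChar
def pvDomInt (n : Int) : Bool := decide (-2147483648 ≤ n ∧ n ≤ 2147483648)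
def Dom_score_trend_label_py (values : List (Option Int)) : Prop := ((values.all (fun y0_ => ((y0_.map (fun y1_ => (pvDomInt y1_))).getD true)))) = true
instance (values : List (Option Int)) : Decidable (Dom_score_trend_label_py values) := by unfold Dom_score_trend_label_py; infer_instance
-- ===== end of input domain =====

-- ===== PORT A =====
-- B replaces A's filtered-list build by two early-exit scans (forward for the first
-- non-None value, over the reversed list for the last); objective: alternative.
def score_trend_label_py (values : List (Option Int)) : String :=
  let valid := values.filterMap id
  if valid.length < 2 then "INSUFICIENT DATE"
  else
    match PySem.List.pyGet? valid (-1), PySem.List.pyGet? valid 0 with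
    | some last, some first =>
      let delta := last - first
      if delta > 5 then "IN IMBUNATATIRE"
      else if delta < -5 then "IN DETERIORARE"
      else "STABIL"
    | _, _ => ""  -- unreachable: valid has length ≥ 2 here

-- ===== PORT B =====
-- first non-None value together with the suffix after it (Source B's _first_valid)
def firstValid : List (Option Int) → Option (Int × List (Option Int))
  | [] => none
  | none :: rest => firstValid rest
  | some x :: rest => some (x, rest)

def score_trend_label_py_alt (values : List (Option Int)) : String :=
  match firstValid values with
  | none => "INSUFICIENT DATE"
  | some (first, rest) =>
    match firstValid rest with
    | none => "INSUFICIENT DATE"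
    | some _ =>
      match firstValid values.reverse with
      | none => "INSUFICIENT DATE"  -- unreachable: values holds a non-None value
      | some (last, _) =>
        let delta := last - first
        if delta > 5 then "IN IMBUNATATIRE"
        else if delta < -5 then "IN DETERIORARE"
        else "STABIL"

-- ===== PRECONDITION & SPEC =====
def Spec_score_trend_label_py (values : List (Option Int)) (out : String) : Prop := out = score_trend_label_py_alt values
instance (values : List (Option Int)) (out : String) : Decidable (Spec_score_trend_label_py values out) := by unfold Spec_score_trend_label_py; infer_instance

-- ===== CLAIM (what is proved, stated in full; the proofs are below) =====
def Claim_equal_score_trend_label_py : Prop := ∀ (values : List (Option Int)), Dom_score_trend_label_py values → Spec_score_trend_label_py values (score_trend_label_py values)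

-- ===== LEMMAS AND PROOFS =====

theorem firstValid_none_iff (l : List (Option Int)) :
    firstValid l = none ↔ l.filterMap id = [] := by
  induction l with
  | nil => simp [firstValid]
  | cons h t ih => cases h <;> simp [firstValid, ih]

theorem filterMap_of_firstValid {l rest : List (Option Int)} {x : Int}
    (h : firstValid l = some (x, rest)) :
    l.filterMap id = x :: rest.filterMap id := by
  induction l with
  | nil => simp [firstValid] at h
  | cons hd t ih =>
    cases hd with
    | none => simp [firstValid] at h; simpa using ih h
    | some y => simp [firstValid] at h; simp [h.1, h.2]

-- ===== VERDICT (by name: the statement is the Claim_ definition above) =====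
theorem score_trend_label_py_spec : Claim_equal_score_trend_label_py := by
  intro values _
  unfold Spec_score_trend_label_py score_trend_label_py score_trend_label_py_alt
  cases h1 : firstValid values with
  | none =>
    have hv : values.filterMap (fun x => x) = [] := (firstValid_none_iff values).1 h1
    simp [hv]
  | some p =>
    obtain ⟨first, rest⟩ := p
    have hv : values.filterMap (fun x => x) = first :: rest.filterMap (fun x => x) :=
      filterMap_of_firstValid h1
    cases h2 : firstValid rest with
    | none =>
      have hr : rest.filterMap (fun x => x) = [] := (firstValid_none_iff rest).1 h2
      simp [hv, hr, h2]
    | some q =>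
      obtain ⟨x2, rest2⟩ := q
      have hr : rest.filterMap (fun x => x) = x2 :: rest2.filterMap (fun x => x) :=
        filterMap_of_firstValid h2
      cases h3 : firstValid values.reverse with
      | none =>
        exfalso
        have h0 : values.reverse.filterMap id = [] := (firstValid_none_iff _).1 h3
        rw [List.filterMap_reverse] at h0
        have h0' : (values.filterMap (fun x => x)).reverse = [] := h0
        rw [hv] at h0'
        simp at h0'
      | some r =>
        obtain ⟨last, rrest⟩ := r
        have hrev : values.reverse.filterMap id = last :: rrest.filterMap id :=
          filterMap_of_firstValid h3
        rw [List.filterMap_reverse] at hrev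
        have hlast : (values.filterMap (fun x => x)).getLast? = some last := by
          rw [← List.head?_reverse]; rw [show (values.filterMap (fun x => x)).reverse
            = last :: rrest.filterMap id from hrev]; rfl
        simp only [hv] at hlast
        simp only [h2]
        have hv0 : List.filterMap id values = first :: List.filterMap id rest := hv
        have hr0 : List.filterMap id rest = x2 :: List.filterMap id rest2 := hr
        have hlast0 : (first :: List.filterMap id rest).getLast? = some last := hlast
        rw [hv0, PySem.List.pyGet?_neg_one, PySem.List.pyGet?_zero, hlast0, hr0]
        simp
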